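-- pv_equiv track=rewrite | github.com/bowersd/lat2sgaLoans | monteCarlo/count_sylls.py | alt_w_fin_degen
-- ===== SOURCE A (Python) =====
-- def alt_w_fin_degen(cnt):
--     parity = True
--     h = []
--     for c in cnt:
--         h.append(parity)
--         parity = not parity
--     h[-1] = True
--     return h
-- ===== SOURCE B (Python) =====
-- def alt_w_fin_degen(cnt):
--     n = sum(1 for _ in cnt)
--     h = ([True, False] * ((n + 1) // 2))[:n]
--     h[-1] = True
--     return h
-- ===== Notes on version B (the rewrite author's own statement) =====
-- stated objective: idiomatic
-- what changed: Replaces the element-by-element append loop toggling a parity flag with a bulk construction: count the elements, build the alternating list by repeating [True, False] and truncating, then force the last element True.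
import Mathlib
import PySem

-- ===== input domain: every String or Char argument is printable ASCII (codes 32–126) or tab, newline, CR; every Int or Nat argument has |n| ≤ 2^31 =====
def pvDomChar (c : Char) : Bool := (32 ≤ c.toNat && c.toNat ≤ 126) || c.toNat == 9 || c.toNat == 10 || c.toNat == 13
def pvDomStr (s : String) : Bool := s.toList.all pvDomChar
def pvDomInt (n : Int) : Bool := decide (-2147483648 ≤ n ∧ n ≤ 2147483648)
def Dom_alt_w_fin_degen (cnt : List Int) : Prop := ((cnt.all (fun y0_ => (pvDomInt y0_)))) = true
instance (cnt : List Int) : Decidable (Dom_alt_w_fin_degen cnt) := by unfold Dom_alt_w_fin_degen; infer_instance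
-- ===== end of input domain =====

-- B builds the alternating list by repeating [True, False] and truncating instead of an
-- append loop with a parity flag (idiomatic); equal on all nonempty lists (both raise on []).


-- ===== PORT A =====
-- loop: parity starts true, append parity, toggle; then h[-1] = True (dropLast ++ [true];
-- Python raises IndexError on empty h, excluded by Pre_)
def alt_w_fin_degen (cnt : List Int) : List Bool :=
  let st := cnt.foldl (fun (s : Bool × List Bool) _ => (!s.1, s.2 ++ [s.1])) (true, [])
  st.2.dropLast ++ [true]

-- ===== PORT B =====
-- n = sum(1 for _ in cnt); h = ([True, False] * ((n+1)//2))[:n]; h[-1] = True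
def alt_w_fin_degen_alt (cnt : List Int) : List Bool :=
  let n := cnt.foldl (fun (k : Nat) _ => k + 1) 0
  let h := ((List.replicate ((n + 1) / 2) [true, false]).flatten).take n
  h.dropLast ++ [true]

-- ===== PRECONDITION & SPEC =====
-- Pre_ excludes the empty list, on which both Pythons raise IndexError at h[-1] = True.
def Pre_alt_w_fin_degen (cnt : List Int) : Prop := cnt ≠ []
instance (cnt : List Int) : Decidable (Pre_alt_w_fin_degen cnt) := by unfold Pre_alt_w_fin_degen; infer_instance
def pvWitness_alt_w_fin_degen : List Int := [3, 1, 2]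
def Spec_alt_w_fin_degen (cnt : List Int) (out : List Bool) : Prop := out = alt_w_fin_degen_alt cnt
instance (cnt : List Int) (out : List Bool) : Decidable (Spec_alt_w_fin_degen cnt out) := by unfold Spec_alt_w_fin_degen; infer_instance

-- ===== CLAIM (what is proved, stated in full; the proofs are below) =====
def Claim_equal_alt_w_fin_degen : Prop := ∀ (cnt : List Int), Dom_alt_w_fin_degen cnt → Pre_alt_w_fin_degen cnt → Spec_alt_w_fin_degen cnt (alt_w_fin_degen cnt)

-- ===== LEMMAS AND PROOFS =====

-- the alternating pattern of length k starting with p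
def altPat (p : Bool) : Nat → List Bool
  | 0 => []
  | k + 1 => p :: altPat (!p) k

theorem foldA_eq (cnt : List Int) (p : Bool) (acc : List Bool) :
    (cnt.foldl (fun (s : Bool × List Bool) _ => (!s.1, s.2 ++ [s.1])) (p, acc)).2
      = acc ++ altPat p cnt.length := by
  induction cnt generalizing p acc with
  | nil => simp [altPat]
  | cons c cs ih => simp [List.foldl, ih, altPat]

theorem foldLen (cnt : List Int) (k : Nat) :
    cnt.foldl (fun (k : Nat) _ => k + 1) k = k + cnt.length := by
  induction cnt generalizing k with
  | nil => simp
  | cons c cs ih => simp [List.foldl, ih]; omega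

theorem flatten_rep (m : Nat) :
    (List.replicate m [true, false]).flatten = altPat true (2 * m) := by
  induction m with
  | zero => simp [altPat]
  | succ m ih =>
      simp [List.replicate_succ, ih, altPat]

theorem take_altPat (n : Nat) : ∀ (p : Bool) (k : Nat), n ≤ k → (altPat p k).take n = altPat p n := by
  induction n with
  | zero => intro p k _; simp [altPat]
  | succ n ih =>
      intro p k hk
      cases k with
      | zero => omega
      | succ k => simp [altPat, ih (!p) k (by omega)]

theorem hB_eq (n : Nat) :
    ((List.replicate ((n + 1) / 2) [true, false]).flatten).take n = altPat true n := by
  rw [flatten_rep]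
  exact take_altPat n true _ (by omega)

-- ===== VERDICT (by name: the statement is the Claim_ definition above) =====
theorem alt_w_fin_degen_spec : Claim_equal_alt_w_fin_degen := by
  intro cnt _ _
  unfold Spec_alt_w_fin_degen alt_w_fin_degen alt_w_fin_degen_alt
  simp only [foldA_eq, foldLen, hB_eq, List.nil_append, Nat.zero_add]
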